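-- pv_equiv track=rewrite | github.com/buskarion/algorithms | python/0007.py | solution
-- ===== SOURCE A (Python) =====
-- def solution(input_str):
--     words = input_str.split()
--     sum = 0
--
--     for w in words:
--         w = ''.join(c for c in w if c.isdigit())
--         if w.isdigit():
--             sum += int(w)
--
--     return sum
-- ===== SOURCE B (Python) =====
-- def solution(input_str):
--     total = 0
--     acc = ""
--     for c in input_str:
--         if c.isspace():
--             if acc:
--                 total += int(acc)
--             acc = ""
--         elif c.isdigit():
--             acc += c
--     if acc:
--         total += int(acc)
--     return total
-- ===== Notes on version B (the rewrite author's own statement) =====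
-- stated objective: alternative
-- what changed: single pass over the characters with an explicit digit accumulator flushed at whitespace boundaries, instead of split() plus a per-word filter-and-join pass
import Mathlib
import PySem

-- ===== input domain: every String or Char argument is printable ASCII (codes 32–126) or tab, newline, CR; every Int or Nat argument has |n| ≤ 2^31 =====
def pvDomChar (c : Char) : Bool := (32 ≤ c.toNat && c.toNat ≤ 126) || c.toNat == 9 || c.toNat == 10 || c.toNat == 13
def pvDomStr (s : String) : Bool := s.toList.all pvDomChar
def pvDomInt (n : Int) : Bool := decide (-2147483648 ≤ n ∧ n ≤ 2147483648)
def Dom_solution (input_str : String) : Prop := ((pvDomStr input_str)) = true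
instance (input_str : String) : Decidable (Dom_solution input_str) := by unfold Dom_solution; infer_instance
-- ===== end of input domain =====

-- B replaces split()+per-word filter/join by a single character pass with a digit accumulator
-- flushed at whitespace boundaries (objective: alternative decomposition, same cost).

-- ===== PORT A =====
-- ''.join(c for c in w if c.isdigit()) over single characters is the filter of w's characters;
-- int(w) is ported as (ofChars? …).getD 0, exact here since the isdigit guard makes int() never raise.
def solution (input_str : String) : Int :=
  (PySem.Str.split₀ input_str).foldl
    (fun sum w =>
      let w' := (w.toList.filter PySem.Chars.isdigit)
      if PySem.Chars.strIsdigit w' then sum + (PySem.Int.ofChars? w').getD 0 else sum)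
    0

-- ===== PORT B =====
-- total += int(acc) is ported as (ofChars? acc).getD 0, exact: acc is a non-empty digit string there.
def solutionAltGo : List Char → Int → List Char → Int
  | [], total, acc =>
      if acc.isEmpty then total else total + (PySem.Int.ofChars? acc).getD 0
  | c :: cs, total, acc =>
      if PySem.Chars.isspace c then
        solutionAltGo cs (if acc.isEmpty then total else total + (PySem.Int.ofChars? acc).getD 0) []
      else if PySem.Chars.isdigit c then
        solutionAltGo cs total (acc ++ [c])
      else
        solutionAltGo cs total acc

def solution_alt (input_str : String) : Int :=
  solutionAltGo input_str.toList 0 []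

-- ===== PRECONDITION & SPEC =====
def Spec_solution (input_str : String) (out : Int) : Prop := out = solution_alt input_str
instance (input_str : String) (out : Int) : Decidable (Spec_solution input_str out) := by unfold Spec_solution; infer_instance

-- ===== CLAIM (what is proved, stated in full; the proofs are below) =====
def Claim_equal_solution : Prop := ∀ (input_str : String), Dom_solution input_str → Spec_solution input_str (solution input_str)

-- ===== LEMMAS AND PROOFS =====

-- A's per-word contribution, on the character level
def gWord (w : List Char) : Int :=
  let w' := w.filter PySem.Chars.isdigit
  if PySem.Chars.strIsdigit w' then (PySem.Int.ofChars? w').getD 0 else 0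

lemma gWord_eq (w : List Char) :
    gWord w = if (w.filter PySem.Chars.isdigit).isEmpty then 0
              else (PySem.Int.ofChars? (w.filter PySem.Chars.isdigit)).getD 0 := by
  have hall : (w.filter PySem.Chars.isdigit).all PySem.Chars.isdigit = true := by
    simp [List.all_filter]
  simp only [gWord, PySem.Chars.strIsdigit, hall, Bool.and_true]
  cases h : (w.filter PySem.Chars.isdigit).isEmpty <;> simp_all

lemma foldl_gWord (ws : List (List Char)) (t : Int) :
    ws.foldl (fun sum w =>
      if PySem.Chars.strIsdigit (w.filter PySem.Chars.isdigit) then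
        sum + (PySem.Int.ofChars? (w.filter PySem.Chars.isdigit)).getD 0
      else sum) t = t + (ws.map gWord).sum := by
  induction ws generalizing t with
  | nil => simp
  | cons w ws ih =>
    simp only [List.foldl_cons, ih, List.map_cons, List.sum_cons, gWord]
    split_ifs <;> ring

-- the key invariant: split₀.go's pending reversed token `cur` corresponds to B's accumulator
-- cur.reverse.filter isdigit, and the already-closed tokens in `acc` to already-flushed sums
lemma main_inv (cs cur : List Char) (acc : List (List Char)) (t : Int) :
    t + ((PySem.Chars.split₀.go cs cur acc).map gWord).sum
      = (acc.reverse.map gWord).sum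
        + solutionAltGo cs t (cur.reverse.filter PySem.Chars.isdigit) := by
  induction cs generalizing cur acc t with
  | nil =>
    rw [PySem.Chars.split₀.go.eq_def]
    by_cases h : cur.isEmpty
    · simp_all [solutionAltGo]
      omega
    · simp only [if_neg h, solutionAltGo, List.reverse_cons, List.map_append, List.sum_append,
        List.map_cons, List.map_nil, List.sum_cons, List.sum_nil, gWord_eq]
      split_ifs <;> ring
  | cons c cs ih =>
    rw [PySem.Chars.split₀.go.eq_def]
    dsimp only
    by_cases hs : PySem.Chars.isspace c
    · by_cases h : cur.isEmpty
      · have hcur : cur = [] := List.isEmpty_iff.mp h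
        subst hcur
        rw [if_pos hs, if_pos List.isEmpty_nil,
          show solutionAltGo (c :: cs) t (List.reverse [] |>.filter PySem.Chars.isdigit) =
            solutionAltGo cs t [] from by simp [solutionAltGo, hs]]
        simpa using ih [] acc t
      · rw [if_pos hs, if_neg h,
          show solutionAltGo (c :: cs) t (cur.reverse.filter PySem.Chars.isdigit) =
            solutionAltGo cs
              (if (cur.reverse.filter PySem.Chars.isdigit).isEmpty then t
               else t + (PySem.Int.ofChars? (cur.reverse.filter PySem.Chars.isdigit)).getD 0) []
            from by simp [solutionAltGo, hs]]
        have hih := ih [] (cur.reverse :: acc)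
          (if (cur.reverse.filter PySem.Chars.isdigit).isEmpty then t
           else t + (PySem.Int.ofChars? (cur.reverse.filter PySem.Chars.isdigit)).getD 0)
        simp only [List.reverse_nil, List.filter_nil, List.reverse_cons, List.map_append,
          List.sum_append, List.map_cons, List.map_nil, List.sum_cons, List.sum_nil] at hih
        have hflush : (if (cur.reverse.filter PySem.Chars.isdigit).isEmpty then t
            else t + (PySem.Int.ofChars? (cur.reverse.filter PySem.Chars.isdigit)).getD 0)
            = t + gWord cur.reverse := by
          rw [gWord_eq]; split_ifs <;> ring
        linarith [hih, hflush]
    · by_cases hd : PySem.Chars.isdigit c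
      · rw [if_neg hs,
          show solutionAltGo (c :: cs) t (cur.reverse.filter PySem.Chars.isdigit) =
            solutionAltGo cs t (cur.reverse.filter PySem.Chars.isdigit ++ [c])
            from by simp [solutionAltGo, hs, hd]]
        have hfe : (c :: cur).reverse.filter PySem.Chars.isdigit
            = cur.reverse.filter PySem.Chars.isdigit ++ [c] := by
          simp [List.filter_append, hd]
        rw [← hfe]
        exact ih (c :: cur) acc t
      · rw [if_neg hs,
          show solutionAltGo (c :: cs) t (cur.reverse.filter PySem.Chars.isdigit) =
            solutionAltGo cs t (cur.reverse.filter PySem.Chars.isdigit)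
            from by simp [solutionAltGo, hs, hd]]
        have hfe : (c :: cur).reverse.filter PySem.Chars.isdigit
            = cur.reverse.filter PySem.Chars.isdigit := by
          simp [List.filter_append, hd]
        rw [← hfe]
        exact ih (c :: cur) acc t

-- ===== VERDICT (by name: the statement is the Claim_ definition above) =====
theorem solution_spec : Claim_equal_solution := by
  intro s _
  show solution s = solution_alt s
  unfold solution solution_alt
  rw [PySem.Str.split₀, List.foldl_map]
  simp only [String.toList_ofList]
  rw [foldl_gWord]
  have := main_inv s.toList [] [] 0
  simpa [PySem.Chars.split₀] using this
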